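-- pv_equiv track=rewrite | github.com/geoglows/geoglows-rest-api | GSP_API/model_utilities.py | reach_to_region
-- ===== SOURCE A (Python) =====
-- from collections import OrderedDict
--
-- def reach_to_region(reach_id=None):
--     # Indonesia 1M's
--     # ------australia 2M (currently 200k's)
--     # Japan 3M's
--     # East Asia 4M's
--     # South Asia 5M's
--     # ------middle_east 6M (currently 600k's)
--     # Africa 7M's
--     # Central Asia 8M's
--     # South America 9M's
--     # West Asia 10M's
--     # -------central_america 11M (currently 900k's)
--     # Europe 12M's
--     # North America 13M's
--
--     lookup = OrderedDict([
--         ('australia-geoglows', 300000),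
--         ('middle_east-geoglows', 700000),
--         ('central_america-geoglows', 1000000),
--         ('islands-geoglows', 2000000),
--         ('japan-geoglows', 4000000),
--         ('east_asia-geoglows', 5000000),
--         ('south_asia-geoglows', 6000000),
--         ('africa-geoglows', 8000000),
--         ('central_asia-geoglows', 9000000),
--         ('south_america-geoglows', 10000000),
--         ('west_asia-geoglows', 11000000),
--         ('europe-geoglows', 13000000),
--         ('north_america-geoglows', 14000000)
--     ])
--
--     for region, threshold in lookup.items():
--         if reach_id < threshold:
--             if region == 'error':
--                 raise ValueError(f'Unable to determine a region paired with reach_id "{reach_id}"')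
--             return region
--     raise ValueError(f'Unable to determine a region paired with reach_id "{reach_id}"')
-- ===== SOURCE B (Python) =====
-- # Binary search over precomputed parallel threshold/region tables instead of a linear scan.
-- _REGIONS = [
--     'australia-geoglows',
--     'middle_east-geoglows',
--     'central_america-geoglows',
--     'islands-geoglows',
--     'japan-geoglows',
--     'east_asia-geoglows',
--     'south_asia-geoglows',
--     'africa-geoglows',
--     'central_asia-geoglows',
--     'south_america-geoglows',
--     'west_asia-geoglows',
--     'europe-geoglows',
--     'north_america-geoglows',
-- ]
-- _THRESHOLDS = [300000, 700000, 1000000, 2000000, 4000000, 5000000, 6000000,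
--                8000000, 9000000, 10000000, 11000000, 13000000, 14000000]
--
-- def reach_to_region(reach_id=None):
--     # hand-written bisect_right: first index with reach_id < _THRESHOLDS[idx]
--     lo, hi = 0, len(_THRESHOLDS)
--     while lo < hi:
--         mid = (lo + hi) // 2
--         if reach_id < _THRESHOLDS[mid]:
--             hi = mid
--         else:
--             lo = mid + 1
--     if lo < len(_REGIONS):
--         return _REGIONS[lo]
--     raise ValueError(f'Unable to determine a region paired with reach_id "{reach_id}"')
-- ===== Notes on version B (the rewrite author's own statement) =====
-- stated objective: alternative
-- what changed: Replaces the linear scan of the OrderedDict with a hand-written bisect_right binary search over two precomputed parallel lists (ascending thresholds and region names).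
import Mathlib
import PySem

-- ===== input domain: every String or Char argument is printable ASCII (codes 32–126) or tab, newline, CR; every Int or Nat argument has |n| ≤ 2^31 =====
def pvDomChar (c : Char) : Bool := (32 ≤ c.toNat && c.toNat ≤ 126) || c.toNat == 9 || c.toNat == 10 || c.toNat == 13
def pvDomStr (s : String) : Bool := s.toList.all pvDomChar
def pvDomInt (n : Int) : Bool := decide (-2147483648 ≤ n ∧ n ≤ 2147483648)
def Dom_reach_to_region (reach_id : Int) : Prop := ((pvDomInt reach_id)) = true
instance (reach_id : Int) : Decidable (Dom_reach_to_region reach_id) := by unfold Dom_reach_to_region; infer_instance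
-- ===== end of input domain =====

-- ===== PORT A =====
-- A's lookup table in insertion order (region, threshold)
def pvLookup : List (String × Int) :=
  [("australia-geoglows", 300000), ("middle_east-geoglows", 700000),
   ("central_america-geoglows", 1000000), ("islands-geoglows", 2000000),
   ("japan-geoglows", 4000000), ("east_asia-geoglows", 5000000),
   ("south_asia-geoglows", 6000000), ("africa-geoglows", 8000000),
   ("central_asia-geoglows", 9000000), ("south_america-geoglows", 10000000),
   ("west_asia-geoglows", 11000000), ("europe-geoglows", 13000000),
   ("north_america-geoglows", 14000000)]

-- the for-loop: first region whose threshold exceeds reach_id; Python raises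
-- ValueError when the loop falls through (excluded by Pre_), ported as ""
def pvScan (reach_id : Int) : List (String × Int) → String
  | [] => ""
  | (region, threshold) :: rest =>
    if reach_id < threshold then
      if region == "error" then "" else region
    else
      pvScan reach_id rest

def reach_to_region (reach_id : Int) : String :=
  pvScan reach_id pvLookup

-- ===== PORT B =====
def pvRegions : List String :=
  ["australia-geoglows", "middle_east-geoglows", "central_america-geoglows",
   "islands-geoglows", "japan-geoglows", "east_asia-geoglows", "south_asia-geoglows",
   "africa-geoglows", "central_asia-geoglows", "south_america-geoglows",
   "west_asia-geoglows", "europe-geoglows", "north_america-geoglows"]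

def pvThresholds : List Int :=
  [300000, 700000, 1000000, 2000000, 4000000, 5000000, 6000000,
   8000000, 9000000, 10000000, 11000000, 13000000, 14000000]

-- Source B's while-loop as fuel recursion (fuel = 13 ≥ hi - lo bounds the iterations)
def pvBisect (reach_id : Int) : Nat → Nat → Nat → Nat
  | 0, lo, _ => lo
  | fuel + 1, lo, hi =>
    if lo < hi then
      let mid := (lo + hi) / 2
      if reach_id < pvThresholds.getD mid 0 then
        pvBisect reach_id fuel lo mid
      else
        pvBisect reach_id fuel (mid + 1) hi
    else lo

-- the raising branch (lo = 13) is excluded by Pre_, ported as ""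
def reach_to_region_alt (reach_id : Int) : String :=
  let lo := pvBisect reach_id 13 0 13
  if lo < 13 then pvRegions.getD lo "" else ""

-- ===== PRECONDITION & SPEC =====
-- A raises ValueError exactly when reach_id ≥ 14000000 (no threshold exceeds it); Pre_ excludes those inputs.
def Pre_reach_to_region (reach_id : Int) : Prop := reach_id < 14000000
instance (reach_id : Int) : Decidable (Pre_reach_to_region reach_id) := by unfold Pre_reach_to_region; infer_instance
def pvWitness_reach_to_region : Int := (650000)
def Spec_reach_to_region (reach_id : Int) (out : String) : Prop := out = reach_to_region_alt reach_id
instance (reach_id : Int) (out : String) : Decidable (Spec_reach_to_region reach_id out) := by unfold Spec_reach_to_region; infer_instance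

-- ===== CLAIM (what is proved, stated in full; the proofs are below) =====
def Claim_equal_reach_to_region : Prop := ∀ (reach_id : Int), Dom_reach_to_region reach_id → Pre_reach_to_region reach_id → Spec_reach_to_region reach_id (reach_to_region reach_id)

-- ===== LEMMAS AND PROOFS =====

-- ===== VERDICT (by name: the statement is the Claim_ definition above) =====
theorem reach_to_region_spec : Claim_equal_reach_to_region := by
  intro r _ hPre
  unfold Spec_reach_to_region reach_to_region reach_to_region_alt
  unfold Pre_reach_to_region at hPre
  rcases lt_or_ge r 300000 with h0 | h0
  ·
    have hl0 : r < 300000 := by omega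
    have hl1 : r < 700000 := by omega
    have hl2 : r < 1000000 := by omega
    have hl3 : r < 2000000 := by omega
    have hl4 : r < 4000000 := by omega
    have hl5 : r < 5000000 := by omega
    have hl6 : r < 6000000 := by omega
    have hl7 : r < 8000000 := by omega
    have hl8 : r < 9000000 := by omega
    have hl9 : r < 10000000 := by omega
    have hl10 : r < 11000000 := by omega
    have hl11 : r < 13000000 := by omega
    have hl12 : r < 14000000 := by omega
    simp [pvScan, pvLookup, pvBisect, pvThresholds, pvRegions, hl0, hl1, hl2, hl3, hl4, hl5, hl6, hl7, hl8, hl9, hl10, hl11, hl12]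
  ·
    rcases lt_or_ge r 700000 with h1 | h1
    ·
      have hg0 : ¬ r < 300000 := by omega
      have hl1 : r < 700000 := by omega
      have hl2 : r < 1000000 := by omega
      have hl3 : r < 2000000 := by omega
      have hl4 : r < 4000000 := by omega
      have hl5 : r < 5000000 := by omega
      have hl6 : r < 6000000 := by omega
      have hl7 : r < 8000000 := by omega
      have hl8 : r < 9000000 := by omega
      have hl9 : r < 10000000 := by omega
      have hl10 : r < 11000000 := by omega
      have hl11 : r < 13000000 := by omega
      have hl12 : r < 14000000 := by omega
      simp [pvScan, pvLookup, pvBisect, pvThresholds, pvRegions, hg0, hl1, hl2, hl3, hl4, hl5, hl6, hl7, hl8, hl9, hl10, hl11, hl12]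
    ·
      rcases lt_or_ge r 1000000 with h2 | h2
      ·
        have hg0 : ¬ r < 300000 := by omega
        have hg1 : ¬ r < 700000 := by omega
        have hl2 : r < 1000000 := by omega
        have hl3 : r < 2000000 := by omega
        have hl4 : r < 4000000 := by omega
        have hl5 : r < 5000000 := by omega
        have hl6 : r < 6000000 := by omega
        have hl7 : r < 8000000 := by omega
        have hl8 : r < 9000000 := by omega
        have hl9 : r < 10000000 := by omega
        have hl10 : r < 11000000 := by omega
        have hl11 : r < 13000000 := by omega
        have hl12 : r < 14000000 := by omega
        simp [pvScan, pvLookup, pvBisect, pvThresholds, pvRegions, hg0, hg1, hl2, hl3, hl4, hl5, hl6, hl7, hl8, hl9, hl10, hl11, hl12]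
      ·
        rcases lt_or_ge r 2000000 with h3 | h3
        ·
          have hg0 : ¬ r < 300000 := by omega
          have hg1 : ¬ r < 700000 := by omega
          have hg2 : ¬ r < 1000000 := by omega
          have hl3 : r < 2000000 := by omega
          have hl4 : r < 4000000 := by omega
          have hl5 : r < 5000000 := by omega
          have hl6 : r < 6000000 := by omega
          have hl7 : r < 8000000 := by omega
          have hl8 : r < 9000000 := by omega
          have hl9 : r < 10000000 := by omega
          have hl10 : r < 11000000 := by omega
          have hl11 : r < 13000000 := by omega
          have hl12 : r < 14000000 := by omega
          simp [pvScan, pvLookup, pvBisect, pvThresholds, pvRegions, hg0, hg1, hg2, hl3, hl4, hl5, hl6, hl7, hl8, hl9, hl10, hl11, hl12]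
        ·
          rcases lt_or_ge r 4000000 with h4 | h4
          ·
            have hg0 : ¬ r < 300000 := by omega
            have hg1 : ¬ r < 700000 := by omega
            have hg2 : ¬ r < 1000000 := by omega
            have hg3 : ¬ r < 2000000 := by omega
            have hl4 : r < 4000000 := by omega
            have hl5 : r < 5000000 := by omega
            have hl6 : r < 6000000 := by omega
            have hl7 : r < 8000000 := by omega
            have hl8 : r < 9000000 := by omega
            have hl9 : r < 10000000 := by omega
            have hl10 : r < 11000000 := by omega
            have hl11 : r < 13000000 := by omega
            have hl12 : r < 14000000 := by omega
            simp [pvScan, pvLookup, pvBisect, pvThresholds, pvRegions, hg0, hg1, hg2, hg3, hl4, hl5, hl6, hl7, hl8, hl9, hl10, hl11, hl12]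
          ·
            rcases lt_or_ge r 5000000 with h5 | h5
            ·
              have hg0 : ¬ r < 300000 := by omega
              have hg1 : ¬ r < 700000 := by omega
              have hg2 : ¬ r < 1000000 := by omega
              have hg3 : ¬ r < 2000000 := by omega
              have hg4 : ¬ r < 4000000 := by omega
              have hl5 : r < 5000000 := by omega
              have hl6 : r < 6000000 := by omega
              have hl7 : r < 8000000 := by omega
              have hl8 : r < 9000000 := by omega
              have hl9 : r < 10000000 := by omega
              have hl10 : r < 11000000 := by omega
              have hl11 : r < 13000000 := by omega
              have hl12 : r < 14000000 := by omega
              simp [pvScan, pvLookup, pvBisect, pvThresholds, pvRegions, hg0, hg1, hg2, hg3, hg4, hl5, hl6, hl7, hl8, hl9, hl10, hl11, hl12]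
            ·
              rcases lt_or_ge r 6000000 with h6 | h6
              ·
                have hg0 : ¬ r < 300000 := by omega
                have hg1 : ¬ r < 700000 := by omega
                have hg2 : ¬ r < 1000000 := by omega
                have hg3 : ¬ r < 2000000 := by omega
                have hg4 : ¬ r < 4000000 := by omega
                have hg5 : ¬ r < 5000000 := by omega
                have hl6 : r < 6000000 := by omega
                have hl7 : r < 8000000 := by omega
                have hl8 : r < 9000000 := by omega
                have hl9 : r < 10000000 := by omega
                have hl10 : r < 11000000 := by omega
                have hl11 : r < 13000000 := by omega
                have hl12 : r < 14000000 := by omega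
                simp [pvScan, pvLookup, pvBisect, pvThresholds, pvRegions, hg0, hg1, hg2, hg3, hg4, hg5, hl6, hl7, hl8, hl9, hl10, hl11, hl12]
              ·
                rcases lt_or_ge r 8000000 with h7 | h7
                ·
                  have hg0 : ¬ r < 300000 := by omega
                  have hg1 : ¬ r < 700000 := by omega
                  have hg2 : ¬ r < 1000000 := by omega
                  have hg3 : ¬ r < 2000000 := by omega
                  have hg4 : ¬ r < 4000000 := by omega
                  have hg5 : ¬ r < 5000000 := by omega
                  have hg6 : ¬ r < 6000000 := by omega
                  have hl7 : r < 8000000 := by omega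
                  have hl8 : r < 9000000 := by omega
                  have hl9 : r < 10000000 := by omega
                  have hl10 : r < 11000000 := by omega
                  have hl11 : r < 13000000 := by omega
                  have hl12 : r < 14000000 := by omega
                  simp [pvScan, pvLookup, pvBisect, pvThresholds, pvRegions, hg0, hg1, hg2, hg3, hg4, hg5, hg6, hl7, hl8, hl9, hl10, hl11, hl12]
                ·
                  rcases lt_or_ge r 9000000 with h8 | h8
                  ·
                    have hg0 : ¬ r < 300000 := by omega
                    have hg1 : ¬ r < 700000 := by omega
                    have hg2 : ¬ r < 1000000 := by omega
                    have hg3 : ¬ r < 2000000 := by omega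
                    have hg4 : ¬ r < 4000000 := by omega
                    have hg5 : ¬ r < 5000000 := by omega
                    have hg6 : ¬ r < 6000000 := by omega
                    have hg7 : ¬ r < 8000000 := by omega
                    have hl8 : r < 9000000 := by omega
                    have hl9 : r < 10000000 := by omega
                    have hl10 : r < 11000000 := by omega
                    have hl11 : r < 13000000 := by omega
                    have hl12 : r < 14000000 := by omega
                    simp [pvScan, pvLookup, pvBisect, pvThresholds, pvRegions, hg0, hg1, hg2, hg3, hg4, hg5, hg6, hg7, hl8, hl9, hl10, hl11, hl12]
                  ·
                    rcases lt_or_ge r 10000000 with h9 | h9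
                    ·
                      have hg0 : ¬ r < 300000 := by omega
                      have hg1 : ¬ r < 700000 := by omega
                      have hg2 : ¬ r < 1000000 := by omega
                      have hg3 : ¬ r < 2000000 := by omega
                      have hg4 : ¬ r < 4000000 := by omega
                      have hg5 : ¬ r < 5000000 := by omega
                      have hg6 : ¬ r < 6000000 := by omega
                      have hg7 : ¬ r < 8000000 := by omega
                      have hg8 : ¬ r < 9000000 := by omega
                      have hl9 : r < 10000000 := by omega
                      have hl10 : r < 11000000 := by omega
                      have hl11 : r < 13000000 := by omega
                      have hl12 : r < 14000000 := by omega
                      simp [pvScan, pvLookup, pvBisect, pvThresholds, pvRegions, hg0, hg1, hg2, hg3, hg4, hg5, hg6, hg7, hg8, hl9, hl10, hl11, hl12]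
                    ·
                      rcases lt_or_ge r 11000000 with h10 | h10
                      ·
                        have hg0 : ¬ r < 300000 := by omega
                        have hg1 : ¬ r < 700000 := by omega
                        have hg2 : ¬ r < 1000000 := by omega
                        have hg3 : ¬ r < 2000000 := by omega
                        have hg4 : ¬ r < 4000000 := by omega
                        have hg5 : ¬ r < 5000000 := by omega
                        have hg6 : ¬ r < 6000000 := by omega
                        have hg7 : ¬ r < 8000000 := by omega
                        have hg8 : ¬ r < 9000000 := by omega
                        have hg9 : ¬ r < 10000000 := by omega
                        have hl10 : r < 11000000 := by omega
                        have hl11 : r < 13000000 := by omega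
                        have hl12 : r < 14000000 := by omega
                        simp [pvScan, pvLookup, pvBisect, pvThresholds, pvRegions, hg0, hg1, hg2, hg3, hg4, hg5, hg6, hg7, hg8, hg9, hl10, hl11, hl12]
                      ·
                        rcases lt_or_ge r 13000000 with h11 | h11
                        ·
                          have hg0 : ¬ r < 300000 := by omega
                          have hg1 : ¬ r < 700000 := by omega
                          have hg2 : ¬ r < 1000000 := by omega
                          have hg3 : ¬ r < 2000000 := by omega
                          have hg4 : ¬ r < 4000000 := by omega
                          have hg5 : ¬ r < 5000000 := by omega
                          have hg6 : ¬ r < 6000000 := by omega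
                          have hg7 : ¬ r < 8000000 := by omega
                          have hg8 : ¬ r < 9000000 := by omega
                          have hg9 : ¬ r < 10000000 := by omega
                          have hg10 : ¬ r < 11000000 := by omega
                          have hl11 : r < 13000000 := by omega
                          have hl12 : r < 14000000 := by omega
                          simp [pvScan, pvLookup, pvBisect, pvThresholds, pvRegions, hg0, hg1, hg2, hg3, hg4, hg5, hg6, hg7, hg8, hg9, hg10, hl11, hl12]
                        ·
                          have hg0 : ¬ r < 300000 := by omega
                          have hg1 : ¬ r < 700000 := by omega
                          have hg2 : ¬ r < 1000000 := by omega
                          have hg3 : ¬ r < 2000000 := by omega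
                          have hg4 : ¬ r < 4000000 := by omega
                          have hg5 : ¬ r < 5000000 := by omega
                          have hg6 : ¬ r < 6000000 := by omega
                          have hg7 : ¬ r < 8000000 := by omega
                          have hg8 : ¬ r < 9000000 := by omega
                          have hg9 : ¬ r < 10000000 := by omega
                          have hg10 : ¬ r < 11000000 := by omega
                          have hg11 : ¬ r < 13000000 := by omega
                          have hl12 : r < 14000000 := by omega
                          simp [pvScan, pvLookup, pvBisect, pvThresholds, pvRegions, hg0, hg1, hg2, hg3, hg4, hg5, hg6, hg7, hg8, hg9, hg10, hg11, hl12]
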